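-- pv_equiv track=rewrite | github.com/bytedance/ic_flow_platform | bin/user_config.py | remove_dependency_specific_item
-- ===== SOURCE A (Python) =====
-- def remove_dependency_specific_item(dependency, remove_item):
--     if dependency.find(remove_item) == -1:
--         new_dependency = dependency
--     else:
--         first_dependency_list = dependency.split(',')
--         new_first_dependency_list = []
--
--         for first_dependency in first_dependency_list:
--             second_dependency_list = first_dependency.split('|')
--             new_second_dependency_list = []
--
--             for second_dependency in second_dependency_list:
--                 third_dependency_list = second_dependency.split('&')
--                 new_third_dependency_list = []
--
--                 for third_dependency in third_dependency_list:
--                     if remove_item != third_dependency: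
--                         new_third_dependency_list.append(third_dependency)
--                     else:
--                         continue
--
--                 new_second_dependency_list.append('&'.join(new_third_dependency_list))
--
--             new_first_dependency_list.append('|'.join(new_second_dependency_list))
--
--         new_dependency = ','.join(new_first_dependency_list)
--
--     return new_dependency
-- ===== SOURCE B (Python) =====
-- def remove_dependency_specific_item(dependency, remove_item):
--     def go(text, delims):
--         d, rest = delims[0], delims[1:]
--         parts = text.split(d)
--         if rest:
--             return d.join(go(p, rest) for p in parts)
--         return d.join(p for p in parts if p != remove_item)
--     return go(dependency, [',', '|', '&'])
-- ===== Notes on version B (the rewrite author's own statement) =====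
-- stated objective: simpler
-- what changed: Replaced the three hand-written nested split/filter/join loops and the find-guard by one short recursive helper over the delimiter list [',','|','&'] that filters only at the innermost level; the find-guard is dropped since join(split(x)) reconstructs x exactly when nothing is filtered.
import Mathlib
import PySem

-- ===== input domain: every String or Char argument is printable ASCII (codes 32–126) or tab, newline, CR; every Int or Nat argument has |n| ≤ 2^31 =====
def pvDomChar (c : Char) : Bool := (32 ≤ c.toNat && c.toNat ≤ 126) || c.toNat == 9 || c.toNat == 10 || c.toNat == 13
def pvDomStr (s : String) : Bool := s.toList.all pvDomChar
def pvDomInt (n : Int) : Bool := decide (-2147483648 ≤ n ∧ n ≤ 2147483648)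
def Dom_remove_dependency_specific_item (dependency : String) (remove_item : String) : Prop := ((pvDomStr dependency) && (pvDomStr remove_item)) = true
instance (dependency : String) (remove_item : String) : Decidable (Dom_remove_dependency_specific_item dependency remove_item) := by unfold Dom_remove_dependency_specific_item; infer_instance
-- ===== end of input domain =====

-- B replaces A's three hand-written nested split/filter/join loops and its find-guard by one
-- short recursive helper over the delimiter list [',', '|', '&'] (objective: simpler).

-- ===== PORT A =====
def remove_dependency_specific_item (dependency : String) (remove_item : String) : String :=
  if PySem.Chars.find dependency.toList remove_item.toList = -1 then
    dependency
  else
    let firstDependencyList := PySem.Chars.splitOn dependency.toList [',']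
    let newFirstDependencyList := firstDependencyList.foldl (fun newFirst firstDep =>
      let secondDependencyList := PySem.Chars.splitOn firstDep ['|']
      let newSecondDependencyList := secondDependencyList.foldl (fun newSecond secondDep =>
        let thirdDependencyList := PySem.Chars.splitOn secondDep ['&']
        let newThirdDependencyList := thirdDependencyList.foldl (fun newThird thirdDep =>
          if remove_item.toList != thirdDep then newThird ++ [thirdDep] else newThird) []
        newSecond ++ [PySem.Chars.join ['&'] newThirdDependencyList]) []
      newFirst ++ [PySem.Chars.join ['|'] newSecondDependencyList]) []
    String.ofList (PySem.Chars.join [','] newFirstDependencyList)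

-- ===== PORT B =====
-- Source B's recursive helper go(text, delims); strings handled on the List Char side (exact).
def pvAltGo (removeItem : List Char) : List Char → List Char → List Char
  | text, [] => text
  | text, d :: rest =>
    let parts := PySem.Chars.splitOn text [d]
    if rest.isEmpty then
      PySem.Chars.join [d] (parts.filter (fun p => p != removeItem))
    else
      PySem.Chars.join [d] (parts.map (fun p => pvAltGo removeItem p rest))

def remove_dependency_specific_item_alt (dependency : String) (remove_item : String) : String :=
  String.ofList (pvAltGo remove_item.toList dependency.toList [',', '|', '&'])

-- ===== PRECONDITION & SPEC =====
def Spec_remove_dependency_specific_item (dependency : String) (remove_item : String) (out : String) : Prop := out = remove_dependency_specific_item_alt dependency remove_item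
instance (dependency : String) (remove_item : String) (out : String) : Decidable (Spec_remove_dependency_specific_item dependency remove_item out) := by unfold Spec_remove_dependency_specific_item; infer_instance

-- ===== CLAIM (what is proved, stated in full; the proofs are below) =====
def Claim_equal_remove_dependency_specific_item : Prop := ∀ (dependency : String) (remove_item : String), Dom_remove_dependency_specific_item dependency remove_item → Spec_remove_dependency_specific_item dependency remove_item (remove_dependency_specific_item dependency remove_item)

-- ===== LEMMAS AND PROOFS =====
theorem pv_intercalate_cons (sep x : List Char) (xs : List (List Char)) :
    sep.intercalate (x :: xs) = if xs = [] then x else x ++ sep ++ sep.intercalate xs := by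
  induction xs with
  | nil => simp [List.intercalate]
  | cons y ys ih => simp [List.intercalate, List.intersperse] at *

theorem pv_intercalate_concat (sep y : List Char) :
    ∀ xs : List (List Char), sep.intercalate (xs ++ [y]) =
      if xs = [] then y else sep.intercalate xs ++ sep ++ y := by
  intro xs
  induction xs with
  | nil => simp [List.intercalate]
  | cons x xs ih =>
    rw [List.cons_append, pv_intercalate_cons, pv_intercalate_cons, ih]
    by_cases h : xs = [] <;> simp [h]

theorem pv_join_go (sep : List Char) (hsep : sep ≠ []) :
    ∀ (fuel : Nat) (l cur : List Char) (acc : List (List Char)), l.length < fuel →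
      sep.intercalate (PySem.Chars.splitOn.go sep fuel l cur acc) =
        (if acc = [] then [] else sep.intercalate acc.reverse ++ sep) ++ cur.reverse ++ l := by
  intro fuel
  induction fuel with
  | zero => intro l cur acc h; omega
  | succ fuel ih =>
    intro l cur acc h
    match l with
    | [] =>
      rw [PySem.Chars.splitOn.go.eq_def]
      simp only [List.reverse_cons]
      rw [pv_intercalate_concat]
      by_cases ha : acc = [] <;> simp [ha, List.reverse_eq_nil_iff]
    | c :: rest =>
      rw [PySem.Chars.splitOn.go.eq_def]
      simp only []
      by_cases hp : sep.isPrefixOf (c :: rest) = true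
      · rw [if_pos hp]
        have hpre : sep <+: (c :: rest) := List.isPrefixOf_iff_prefix.mp hp
        have hlen : sep.length ≤ (c :: rest).length := hpre.length_le
        have hslen : 1 ≤ sep.length := by
          cases sep with | nil => exact absurd rfl hsep | cons a b => simp
        rw [ih _ _ _ (by simp at h ⊢; omega)]
        simp only [List.reverse_cons]
        rw [pv_intercalate_concat]
        have hrec : sep ++ List.drop sep.length (c :: rest) = c :: rest := by
          obtain ⟨t, ht⟩ := hpre
          conv_rhs => rw [← ht]
          rw [← ht]; simp
        by_cases ha : acc = [] <;>
          · simp only [ha, List.reverse_eq_nil_iff, if_neg (List.cons_ne_nil _ _),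
              List.reverse_nil, List.append_nil, List.nil_append, List.append_assoc,
              reduceIte]
            rw [hrec]
      · rw [if_neg hp]
        rw [ih _ _ _ (by simp at h ⊢; omega)]
        simp

theorem pv_join_splitOn (sep s : List Char) (hsep : sep ≠ []) :
    sep.intercalate (PySem.Chars.splitOn s sep) = s := by
  rw [PySem.Chars.splitOn, pv_join_go sep hsep _ _ _ _ (by omega)]
  simp

theorem pv_go_mem (sep : List Char) :
    ∀ (fuel : Nat) (l cur : List Char) (acc : List (List Char)) (x : List Char),
      x ∈ PySem.Chars.splitOn.go sep fuel l cur acc → x ∈ acc ∨ x <:+: cur.reverse ++ l := by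
  intro fuel
  induction fuel with
  | zero =>
    intro l cur acc x hx
    rw [PySem.Chars.splitOn.go.eq_def] at hx
    simp at hx
    rcases hx with h | h
    · exact Or.inl h
    · exact Or.inr (h ▸ List.infix_refl _)
  | succ fuel ih =>
    intro l cur acc x hx
    match l with
    | [] =>
      rw [PySem.Chars.splitOn.go.eq_def] at hx
      simp at hx
      rcases hx with h | h
      · exact Or.inl h
      · exact Or.inr (h ▸ (List.prefix_append _ _).isInfix)
    | c :: rest =>
      rw [PySem.Chars.splitOn.go.eq_def] at hx
      simp only [] at hx
      by_cases hp : sep.isPrefixOf (c :: rest) = true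
      · rw [if_pos hp] at hx
        rcases ih _ _ _ _ hx with h | h
        · rcases List.mem_cons.mp h with h | h
          · exact Or.inr (h ▸ (List.prefix_append _ _).isInfix)
          · exact Or.inl h
        · refine Or.inr (h.trans ?_)
          simp only [List.reverse_nil, List.nil_append]
          exact ((List.drop_suffix _ _).trans (List.suffix_append _ _)).isInfix
      · rw [if_neg hp] at hx
        rcases ih _ _ _ _ hx with h | h
        · exact Or.inl h
        · refine Or.inr ?_
          simpa using h

theorem pv_mem_splitOn_infix (sep s x : List Char) (hx : x ∈ PySem.Chars.splitOn s sep) :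
    x <:+: s := by
  rw [PySem.Chars.splitOn] at hx
  rcases pv_go_mem sep _ _ _ _ _ hx with h | h
  · simp at h
  · simpa using h

-- when remove_item is not a substring of s, B's helper reconstructs s exactly
theorem pv_altGo_id (rm : List Char) :
    ∀ (ds s : List Char), ds ≠ [] → ¬ rm <:+: s → pvAltGo rm s ds = s := by
  intro ds
  induction ds with
  | nil => intro s h; exact absurd rfl h
  | cons d rest ih =>
    intro s _ hrm
    rw [pvAltGo]
    by_cases hr : rest.isEmpty
    · rw [if_pos hr]
      rw [List.filter_eq_self.mpr ?_]
      · exact pv_join_splitOn [d] s (by simp)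
      · intro p hp
        simp only [bne_iff_ne, ne_eq]
        intro hpe
        exact hrm (hpe ▸ pv_mem_splitOn_infix _ _ _ hp)
    · rw [if_neg hr]
      have hmap : (PySem.Chars.splitOn s [d]).map (fun p => pvAltGo rm p rest)
          = PySem.Chars.splitOn s [d] := by
        apply List.map_congr_left ?_ |>.trans (List.map_id _)
        intro p hp
        exact ih p (by simpa using hr) (fun h => hrm (h.trans (pv_mem_splitOn_infix _ _ _ hp)))
      rw [hmap]
      exact pv_join_splitOn [d] s (by simp)

-- A's else-branch (the three nested foldl passes) equals B's helper on the full delimiter list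
theorem pv_else_eq (rm s : List Char) :
    PySem.Chars.join [','] ((PySem.Chars.splitOn s [',']).foldl (fun newFirst firstDep =>
      newFirst ++ [PySem.Chars.join ['|'] ((PySem.Chars.splitOn firstDep ['|']).foldl (fun newSecond secondDep =>
        newSecond ++ [PySem.Chars.join ['&'] ((PySem.Chars.splitOn secondDep ['&']).foldl (fun newThird thirdDep =>
          if rm != thirdDep then newThird ++ [thirdDep] else newThird) [])]) [])]) []) =
    pvAltGo rm s [',', '|', '&'] := by
  have h3 : ∀ t : List Char,
      PySem.Chars.join ['&'] ((PySem.Chars.splitOn t ['&']).foldl (fun newThird thirdDep =>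
        if rm != thirdDep then newThird ++ [thirdDep] else newThird) [])
      = pvAltGo rm t ['&'] := by
    intro t
    rw [show (fun (newThird : List (List Char)) thirdDep =>
        if rm != thirdDep then newThird ++ [thirdDep] else newThird)
      = (fun newThird thirdDep =>
        if (fun td => rm != td) thirdDep = true then newThird ++ [id thirdDep] else newThird) by
        funext a b; simp]
    rw [PySem.List.foldl_append_if, pvAltGo]
    simp only [List.nil_append, List.map_id, List.isEmpty_nil, if_true]
    exact congrArg _ (List.filter_congr (fun p _ => by simp [bne_comm]))
  have h2 : ∀ t : List Char,
      PySem.Chars.join ['|'] ((PySem.Chars.splitOn t ['|']).foldl (fun newSecond secondDep =>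
        newSecond ++ [PySem.Chars.join ['&'] ((PySem.Chars.splitOn secondDep ['&']).foldl
          (fun newThird thirdDep =>
            if rm != thirdDep then newThird ++ [thirdDep] else newThird) [])]) [])
      = pvAltGo rm t ['|', '&'] := by
    intro t
    simp only [h3]
    rw [PySem.List.foldl_append_singleton_eq_map, pvAltGo]
    simp only [List.nil_append, List.isEmpty_cons, Bool.false_eq_true, if_false]
  simp only [h2]
  rw [PySem.List.foldl_append_singleton_eq_map]
  conv_rhs => rw [pvAltGo]
  simp only [List.nil_append, List.isEmpty_cons, Bool.false_eq_true, if_false]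

-- ===== VERDICT (by name: the statement is the Claim_ definition above) =====
theorem remove_dependency_specific_item_spec : Claim_equal_remove_dependency_specific_item := by
  intro dependency remove_item _
  unfold Spec_remove_dependency_specific_item
  unfold remove_dependency_specific_item remove_dependency_specific_item_alt
  by_cases hf : PySem.Chars.find dependency.toList remove_item.toList = -1
  · rw [if_pos hf]
    have hni : ¬ remove_item.toList <:+: dependency.toList :=
      (PySem.Chars.find_eq_neg_one_iff _ _).mp hf
    rw [pv_altGo_id _ _ _ (by simp) hni]
    simp [String.ofList]
  · rw [if_neg hf]
    dsimp only
    rw [pv_else_eq]
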